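-- pv_equiv track=rewrite | github.com/gcicc/tableGenCompare | src/models/search_spaces.py | _compute_ganeraid_feasible_triples
-- ===== SOURCE A (Python) =====
-- from typing import Dict, Any, List, Tuple, Optional
--
-- def _compute_ganeraid_feasible_triples(
--     run_mode: str,
--     data_size: int,
--     batch_choices: List[int] = None
-- ) -> List[Tuple[int, int, int]]:
--     """
--     Compute feasible (nr_of_rows, batch_size, hidden_feature_space) triples for GANerAid.
--
--     Constraints:
--     - batch_size % nr_of_rows == 0
--     - hidden_feature_space % nr_of_rows == 0
--     - nr_of_rows >= 4 and nr_of_rows < data_size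
--     - batch_size respects data_size // 10 constraint if batch_choices provided
--
--     Parameters
--     ----------
--     run_mode : str
--         "debug" or "full"
--     data_size : int
--         Number of rows in dataset
--     batch_choices : List[int], optional
--         Pre-filtered batch sizes from _compute_data_aware_bounds
--     """
--     if run_mode == "debug":
--         row_candidates = [4, 5, 8, 10, 16, 20, 25]
--         if batch_choices is None:
--             batch_choices = [64, 100, 128, 200, 256]
--         hidden_choices = [100, 150, 200, 300, 400]
--     else:
--         row_candidates = [4, 5, 8, 10, 16, 20, 25, 32, 40]
--         if batch_choices is None:
--             batch_choices = [32, 64, 100, 128, 200, 256, 400, 500]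
--         hidden_choices = [100, 150, 200, 300, 400, 500, 600]
--
--     feasible = []
--     for nr in row_candidates:
--         if nr < 4 or nr >= data_size:
--             continue
--         for bs in batch_choices:
--             if bs % nr != 0:
--                 continue
--             for hfs in hidden_choices:
--                 if hfs % nr != 0:
--                     continue
--                 feasible.append((nr, bs, hfs))
--
--     return feasible
-- ===== SOURCE B (Python) =====
-- from typing import List, Tuple
--
-- def _compute_ganeraid_feasible_triples(
--     run_mode: str,
--     data_size: int,
--     batch_choices: List[int] = None
-- ) -> List[Tuple[int, int, int]]:
--     if run_mode == "debug":
--         row_candidates = [4, 5, 8, 10, 16, 20, 25]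
--         default_batches = [64, 100, 128, 200, 256]
--         hidden_choices = [100, 150, 200, 300, 400]
--     else:
--         row_candidates = [4, 5, 8, 10, 16, 20, 25, 32, 40]
--         default_batches = [32, 64, 100, 128, 200, 256, 400, 500]
--         hidden_choices = [100, 150, 200, 300, 400, 500, 600]
--     batches = batch_choices if batch_choices is not None else default_batches
--
--     # Inverted index: one data-major pass over each list, distributing every
--     # element into the buckets of the row candidates that divide it.
--     bucket_b = {nr: [] for nr in row_candidates}
--     bucket_h = {nr: [] for nr in row_candidates}
--     for b in batches:
--         for nr in row_candidates:
--             if b % nr == 0: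
--                 bucket_b[nr].append(b)
--     for h in hidden_choices:
--         for nr in row_candidates:
--             if h % nr == 0:
--                 bucket_h[nr].append(h)
--
--     out = []
--     for nr in row_candidates:
--         if 4 <= nr < data_size:
--             for b in bucket_b[nr]:
--                 for h in bucket_h[nr]:
--                     out.append((nr, b, h))
--     return out
-- ===== Notes on version B (the rewrite author's own statement) =====
-- stated objective: alternative
-- what changed: B replaces A's guarded triple nested loop with an inverted index: one data-major pass over the batch list and one over the hidden list distribute each element into per-row-candidate dict buckets, and a final combine pass reads the two buckets per surviving row candidate.
import Mathlib
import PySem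

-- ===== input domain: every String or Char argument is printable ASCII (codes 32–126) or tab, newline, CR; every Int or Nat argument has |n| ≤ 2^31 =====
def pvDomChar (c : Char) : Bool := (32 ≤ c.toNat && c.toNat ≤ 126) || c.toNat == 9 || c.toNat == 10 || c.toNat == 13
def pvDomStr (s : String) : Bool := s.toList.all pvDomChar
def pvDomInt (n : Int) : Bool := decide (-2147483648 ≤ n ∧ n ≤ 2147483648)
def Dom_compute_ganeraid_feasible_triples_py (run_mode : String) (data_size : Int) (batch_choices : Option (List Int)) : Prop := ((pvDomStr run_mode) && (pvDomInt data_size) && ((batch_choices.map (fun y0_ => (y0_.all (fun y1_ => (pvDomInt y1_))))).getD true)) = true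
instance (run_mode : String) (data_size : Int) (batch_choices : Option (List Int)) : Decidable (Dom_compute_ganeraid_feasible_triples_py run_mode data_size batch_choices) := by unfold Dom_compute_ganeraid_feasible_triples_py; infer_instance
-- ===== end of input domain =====

-- B replaces A's guarded triple nested loop by an inverted index: data-major passes distribute
-- each batch/hidden element into per-row-candidate dict buckets, then a combine pass reads them.

-- ===== PORT A =====
def compute_ganeraid_feasible_triples_py (run_mode : String) (data_size : Int) (batch_choices : Option (List Int)) : List (Int × Int × Int) :=
  let row_candidates : List Int :=
    if run_mode == "debug" then [4, 5, 8, 10, 16, 20, 25] else [4, 5, 8, 10, 16, 20, 25, 32, 40]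
  let batch_choices : List Int :=
    match batch_choices with
    | none => if run_mode == "debug" then [64, 100, 128, 200, 256] else [32, 64, 100, 128, 200, 256, 400, 500]
    | some bc => bc
  let hidden_choices : List Int :=
    if run_mode == "debug" then [100, 150, 200, 300, 400] else [100, 150, 200, 300, 400, 500, 600]
  row_candidates.foldl (fun feasible nr =>
    if nr < 4 ∨ nr ≥ data_size then feasible   -- continue
    else batch_choices.foldl (fun feasible bs =>
      if PySem.Int.mod bs nr ≠ 0 then feasible -- continue
      else hidden_choices.foldl (fun feasible hfs =>
        if PySem.Int.mod hfs nr ≠ 0 then feasible -- continue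
        else feasible ++ [(nr, bs, hfs)]) feasible) feasible) []

-- ===== PORT B =====
-- distribution pass of Source B: for x in xs: for nr in rc: if x % nr == 0: bucket[nr].append(x)
def pvDistribute (rc : List Int) (xs : List Int) (d0 : PySem.Dict Int (List Int)) : PySem.Dict Int (List Int) :=
  xs.foldl (fun d x =>
    rc.foldl (fun d nr =>
      if PySem.Int.mod x nr == 0 then d.modify nr [] (fun l => l ++ [x]) else d) d) d0

def compute_ganeraid_feasible_triples_py_alt (run_mode : String) (data_size : Int) (batch_choices : Option (List Int)) : List (Int × Int × Int) :=
  let row_candidates : List Int :=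
    if run_mode == "debug" then [4, 5, 8, 10, 16, 20, 25] else [4, 5, 8, 10, 16, 20, 25, 32, 40]
  let default_batches : List Int :=
    if run_mode == "debug" then [64, 100, 128, 200, 256] else [32, 64, 100, 128, 200, 256, 400, 500]
  let hidden_choices : List Int :=
    if run_mode == "debug" then [100, 150, 200, 300, 400] else [100, 150, 200, 300, 400, 500, 600]
  let batches : List Int := match batch_choices with | some bc => bc | none => default_batches
  -- {nr: [] for nr in row_candidates}
  let init : PySem.Dict Int (List Int) :=
    row_candidates.foldl (fun d nr => d.insert nr []) PySem.Dict.empty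
  let bucket_b := pvDistribute row_candidates batches init
  let bucket_h := pvDistribute row_candidates hidden_choices init
  row_candidates.foldl (fun out nr =>
    if 4 ≤ nr ∧ nr < data_size then
      (bucket_b.getD nr []).foldl (fun out b =>
        (bucket_h.getD nr []).foldl (fun out h => out ++ [(nr, b, h)]) out) out
    else out) []

-- ===== PRECONDITION & SPEC =====
def Spec_compute_ganeraid_feasible_triples_py (run_mode : String) (data_size : Int) (batch_choices : Option (List Int)) (out : List (Int × Int × Int)) : Prop := out = compute_ganeraid_feasible_triples_py_alt run_mode data_size batch_choices
instance (run_mode : String) (data_size : Int) (batch_choices : Option (List Int)) (out : List (Int × Int × Int)) : Decidable (Spec_compute_ganeraid_feasible_triples_py run_mode data_size batch_choices out) := by unfold Spec_compute_ganeraid_feasible_triples_py; infer_instance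

-- ===== CLAIM (what is proved, stated in full; the proofs are below) =====
def Claim_equal_compute_ganeraid_feasible_triples_py : Prop := ∀ (run_mode : String) (data_size : Int) (batch_choices : Option (List Int)), Dom_compute_ganeraid_feasible_triples_py run_mode data_size batch_choices → Spec_compute_ganeraid_feasible_triples_py run_mode data_size batch_choices (compute_ganeraid_feasible_triples_py run_mode data_size batch_choices)

-- ===== LEMMAS AND PROOFS =====

-- the initial bucket dict maps every key to [] under getD _ []
theorem pv_getD_init (rc : List Int) (d : PySem.Dict Int (List Int)) (k : Int)
    (h : d.getD k [] = []) :
    (rc.foldl (fun d nr => d.insert nr []) d).getD k [] = [] := by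
  induction rc generalizing d with
  | nil => simpa using h
  | cons x xs ih =>
    simp only [List.foldl_cons]
    exact ih _ (by rw [PySem.Dict.getD_insert]; split <;> simp [h])

-- a distribution step over rc leaves keys outside rc untouched
theorem pv_step_untouched (rc : List Int) (x : Int) (d : PySem.Dict Int (List Int)) (k : Int)
    (hk : k ∉ rc) :
    (rc.foldl (fun d nr =>
      if PySem.Int.mod x nr == 0 then d.modify nr [] (fun l => l ++ [x]) else d) d).getD k []
    = d.getD k [] := by
  induction rc generalizing d with
  | nil => rfl
  | cons y ys ih =>
    simp only [List.foldl_cons]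
    have hky : k ≠ y := fun h => hk (h ▸ List.mem_cons_self ..)
    have hys : k ∉ ys := fun h => hk (List.mem_cons_of_mem _ h)
    split
    · rw [ih _ hys, PySem.Dict.getD_modify, if_neg hky]
    · exact ih _ hys

-- a single distribution step appends x to bucket k iff k divides x (k ∈ rc, rc nodup)
theorem pv_step (rc : List Int) (x : Int) (d : PySem.Dict Int (List Int)) (k : Int)
    (hk : k ∈ rc) (hnd : rc.Nodup) :
    (rc.foldl (fun d nr =>
      if PySem.Int.mod x nr == 0 then d.modify nr [] (fun l => l ++ [x]) else d) d).getD k []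
    = if PySem.Int.mod x k == 0 then d.getD k [] ++ [x] else d.getD k [] := by
  induction rc generalizing d with
  | nil => cases hk
  | cons y ys ih =>
    simp only [List.foldl_cons]
    rcases List.mem_cons.1 hk with rfl | hmem
    · have hky : k ∉ ys := (List.nodup_cons.1 hnd).1
      by_cases hdiv : PySem.Int.mod x k = 0
      · rw [if_pos (by simp [hdiv]), if_pos (by simp [hdiv]),
            pv_step_untouched _ _ _ _ hky, PySem.Dict.getD_modify, if_pos rfl]
      · rw [if_neg (by simp [hdiv]), if_neg (by simp [hdiv]),
            pv_step_untouched _ _ _ _ hky]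
    · have hnd' := (List.nodup_cons.1 hnd).2
      have hky : k ≠ y := fun h => (List.nodup_cons.1 hnd).1 (h ▸ hmem)
      split
      · rw [ih _ hmem hnd', PySem.Dict.getD_modify, if_neg hky]
      · exact ih _ hmem hnd'

-- the whole distribution pass: bucket k holds exactly the elements of xs divisible by k
theorem pv_distribute (rc xs : List Int) (d : PySem.Dict Int (List Int)) (k : Int)
    (hk : k ∈ rc) (hnd : rc.Nodup) :
    (pvDistribute rc xs d).getD k []
    = d.getD k [] ++ xs.filter (fun x => PySem.Int.mod x k == 0) := by
  unfold pvDistribute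
  induction xs generalizing d with
  | nil => simp
  | cons x xs ih =>
    simp only [List.foldl_cons, List.filter_cons]
    rw [ih, pv_step _ _ _ _ hk hnd]
    split <;> simp_all

-- the bucket built by Source B from the empty-initialised dict, in closed form
theorem pv_bucket (rc xs : List Int) (k : Int) (hk : k ∈ rc) (hnd : rc.Nodup) :
    (pvDistribute rc xs (rc.foldl (fun d nr => d.insert nr []) PySem.Dict.empty)).getD k []
    = xs.filter (fun x => PySem.Int.mod x k == 0) := by
  rw [pv_distribute _ _ _ _ hk hnd, pv_getD_init _ _ _ (by simp [PySem.Dict.getD_empty]),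
      List.nil_append]

-- inner append loop of B's combine: the cartesian product in normal form
theorem pv_inner_h (hs : List Int) (nr bs : Int) (acc : List (Int × Int × Int)) :
    hs.foldl (fun out h => out ++ [(nr, bs, h)]) acc = acc ++ hs.map (fun h => (nr, bs, h)) := by
  induction hs generalizing acc with
  | nil => simp
  | cons h hs ih => simp [ih]

theorem pv_mid_b (bs hs : List Int) (nr : Int) (acc : List (Int × Int × Int)) :
    bs.foldl (fun out b => hs.foldl (fun out h => out ++ [(nr, b, h)]) out) acc
    = acc ++ bs.flatMap (fun b => hs.map (fun h => (nr, b, h))) := by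
  induction bs generalizing acc with
  | nil => simp
  | cons b bs ih => simp only [List.foldl_cons]; rw [pv_inner_h, ih]; simp

-- A's innermost loop over hidden_choices: appends the filtered, mapped hiddens
theorem pv_A_inner (hc : List Int) (nr bs : Int) (acc : List (Int × Int × Int)) :
    hc.foldl (fun feasible hfs =>
      if PySem.Int.mod hfs nr ≠ 0 then feasible else feasible ++ [(nr, bs, hfs)]) acc
    = acc ++ (hc.filter (fun h => PySem.Int.mod h nr == 0)).map (fun h => (nr, bs, h)) := by
  induction hc generalizing acc with
  | nil => simp
  | cons x xs ih =>
    simp only [List.foldl_cons]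
    by_cases hx : PySem.Int.mod x nr = 0
    · rw [if_neg (by simp [hx]), ih]; simp [hx]
    · rw [if_pos hx, ih]; simp [hx]

-- A's middle loop over the batch list: the product of the two filtered lists
theorem pv_A_mid (bc hc : List Int) (nr : Int) (acc : List (Int × Int × Int)) :
    bc.foldl (fun feasible bs =>
      if PySem.Int.mod bs nr ≠ 0 then feasible
      else hc.foldl (fun feasible hfs =>
        if PySem.Int.mod hfs nr ≠ 0 then feasible else feasible ++ [(nr, bs, hfs)]) feasible) acc
    = acc ++ (bc.filter (fun b => PySem.Int.mod b nr == 0)).flatMap (fun b =>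
        (hc.filter (fun h => PySem.Int.mod h nr == 0)).map (fun h => (nr, b, h))) := by
  induction bc generalizing acc with
  | nil => simp
  | cons x xs ih =>
    simp only [List.foldl_cons]
    by_cases hx : PySem.Int.mod x nr = 0
    · rw [if_neg (by simp [hx]), pv_A_inner, ih]; simp [hx]
    · rw [if_pos hx, ih]; simp [hx]

-- A's outer loop in filter/flatMap normal form
theorem pv_A_outer (rc bc hc : List Int) (ds : Int) (acc : List (Int × Int × Int)) :
    rc.foldl (fun feasible nr =>
      if nr < 4 ∨ nr ≥ ds then feasible
      else bc.foldl (fun feasible bs =>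
        if PySem.Int.mod bs nr ≠ 0 then feasible
        else hc.foldl (fun feasible hfs =>
          if PySem.Int.mod hfs nr ≠ 0 then feasible else feasible ++ [(nr, bs, hfs)]) feasible) feasible) acc
    = acc ++ (rc.filter (fun nr => decide (4 ≤ nr) && decide (nr < ds))).flatMap (fun nr =>
        (bc.filter (fun b => PySem.Int.mod b nr == 0)).flatMap (fun b =>
          (hc.filter (fun h => PySem.Int.mod h nr == 0)).map (fun h => (nr, b, h)))) := by
  induction rc generalizing acc with
  | nil => simp
  | cons x xs ih =>
    simp only [List.foldl_cons, List.filter_cons]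
    by_cases hx : x < 4 ∨ x ≥ ds
    · have hx' : ¬ (4 ≤ x ∧ x < ds) := by omega
      rw [if_pos hx, ih, if_neg (by simpa using hx')]
    · have hx' : 4 ≤ x ∧ x < ds := by omega
      rw [if_neg hx, pv_A_mid, ih, if_pos (by simpa using hx')]
      simp

-- B's combine loop in the same normal form, given the buckets' contents on rc
theorem pv_B_outer (rc : List Int) (ds : Int) (bb bh : PySem.Dict Int (List Int))
    (bc hc : List Int)
    (hb : ∀ nr ∈ rc, bb.getD nr [] = bc.filter (fun b => PySem.Int.mod b nr == 0))
    (hh : ∀ nr ∈ rc, bh.getD nr [] = hc.filter (fun h => PySem.Int.mod h nr == 0))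
    (acc : List (Int × Int × Int)) :
    rc.foldl (fun out nr =>
      if 4 ≤ nr ∧ nr < ds then
        (bb.getD nr []).foldl (fun out b =>
          (bh.getD nr []).foldl (fun out h => out ++ [(nr, b, h)]) out) out
      else out) acc
    = acc ++ (rc.filter (fun nr => decide (4 ≤ nr) && decide (nr < ds))).flatMap (fun nr =>
        (bc.filter (fun b => PySem.Int.mod b nr == 0)).flatMap (fun b =>
          (hc.filter (fun h => PySem.Int.mod h nr == 0)).map (fun h => (nr, b, h)))) := by
  induction rc generalizing acc with
  | nil => simp
  | cons x xs ih =>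
    simp only [List.foldl_cons, List.filter_cons]
    have hbx := hb x (List.mem_cons_self ..)
    have hhx := hh x (List.mem_cons_self ..)
    have ih' := ih (fun nr hnr => hb nr (List.mem_cons_of_mem _ hnr))
                   (fun nr hnr => hh nr (List.mem_cons_of_mem _ hnr))
    by_cases hx : 4 ≤ x ∧ x < ds
    · rw [if_pos hx, if_pos (by simp [hx.1, hx.2]), hbx, hhx, pv_mid_b, ih']; simp
    · rw [if_neg hx, if_neg (by simp; omega), ih']

-- ===== VERDICT (by name: the statement is the Claim_ definition above) =====
theorem compute_ganeraid_feasible_triples_py_spec : Claim_equal_compute_ganeraid_feasible_triples_py := by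
  intro run_mode data_size batch_choices _
  unfold Spec_compute_ganeraid_feasible_triples_py
  unfold compute_ganeraid_feasible_triples_py compute_ganeraid_feasible_triples_py_alt
  cases batch_choices <;> by_cases h : run_mode == "debug" <;>
    simp only [h, if_true, if_false, Bool.false_eq_true] <;>
    rw [pv_A_outer, pv_B_outer _ _ _ _ _ _
        (fun nr hnr => pv_bucket _ _ _ hnr (by decide))
        (fun nr hnr => pv_bucket _ _ _ hnr (by decide))]
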